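-- pv_equiv track=rewrite | github.com/kying321/trade_test | system/scripts/build_crypto_shortline_price_template_snapshot.py | candidate_symbols
-- ===== SOURCE A (Python) =====
-- from typing import Any
--
-- def text(value: Any) -> str:
--     return str(value or "").strip()
--
-- def as_dict(value: Any) -> dict[str, Any]:
--     return value if isinstance(value, dict) else {}
--
-- def as_list(value: Any) -> list[Any]:
--     return value if isinstance(value, list) else []
--
-- def candidate_symbols(
--     route_symbol_value: str,
--     execution_gate_payload: dict[str, Any],
--     live_bars_snapshot_payload: dict[str, Any],
-- ) -> list[str]:
--     ordered: list[str] = []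
--     for raw in [route_symbol_value, *as_list(live_bars_snapshot_payload.get("materialized_symbols"))]:
--         symbol = text(raw).upper()
--         if symbol and symbol not in ordered:
--             ordered.append(symbol)
--     for row in as_list(execution_gate_payload.get("symbols")):
--         symbol = text(as_dict(row).get("symbol")).upper()
--         if symbol and symbol not in ordered:
--             ordered.append(symbol)
--     return ordered
-- ===== SOURCE B (Python) =====
-- from typing import Any
--
-- def text(value: Any) -> str:
--     return str(value or "").strip()
--
-- def as_dict(value: Any) -> dict[str, Any]:
--     return value if isinstance(value, dict) else {}
--
-- def as_list(value: Any) -> list[Any]: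
--     return value if isinstance(value, list) else []
--
-- def _dedup_purge(xs: list[str]) -> list[str]:
--     # first-occurrence dedup by recursion: keep the head, delete all its
--     # later duplicates from the tail, recurse on what is left.
--     if not xs:
--         return []
--     head = xs[0]
--     return [head] + _dedup_purge([y for y in xs[1:] if y != head])
--
-- def candidate_symbols(
--     route_symbol_value: str,
--     execution_gate_payload: dict[str, Any],
--     live_bars_snapshot_payload: dict[str, Any],
-- ) -> list[str]:
--     stream = [route_symbol_value]
--     stream += as_list(live_bars_snapshot_payload.get("materialized_symbols"))
--     stream += [as_dict(row).get("symbol") for row in as_list(execution_gate_payload.get("symbols"))]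
--     syms = [s for s in (text(raw).upper() for raw in stream) if s]
--     return _dedup_purge(syms)
-- ===== Notes on version B (the rewrite author's own statement) =====
-- stated objective: alternative
-- what changed: B flattens the three sources into one normalized stream and deduplicates by head-and-purge recursion (keep the head, delete its later duplicates, recurse on the remainder) instead of A's two interleaved loops that test membership in the growing output list.
import Mathlib
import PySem

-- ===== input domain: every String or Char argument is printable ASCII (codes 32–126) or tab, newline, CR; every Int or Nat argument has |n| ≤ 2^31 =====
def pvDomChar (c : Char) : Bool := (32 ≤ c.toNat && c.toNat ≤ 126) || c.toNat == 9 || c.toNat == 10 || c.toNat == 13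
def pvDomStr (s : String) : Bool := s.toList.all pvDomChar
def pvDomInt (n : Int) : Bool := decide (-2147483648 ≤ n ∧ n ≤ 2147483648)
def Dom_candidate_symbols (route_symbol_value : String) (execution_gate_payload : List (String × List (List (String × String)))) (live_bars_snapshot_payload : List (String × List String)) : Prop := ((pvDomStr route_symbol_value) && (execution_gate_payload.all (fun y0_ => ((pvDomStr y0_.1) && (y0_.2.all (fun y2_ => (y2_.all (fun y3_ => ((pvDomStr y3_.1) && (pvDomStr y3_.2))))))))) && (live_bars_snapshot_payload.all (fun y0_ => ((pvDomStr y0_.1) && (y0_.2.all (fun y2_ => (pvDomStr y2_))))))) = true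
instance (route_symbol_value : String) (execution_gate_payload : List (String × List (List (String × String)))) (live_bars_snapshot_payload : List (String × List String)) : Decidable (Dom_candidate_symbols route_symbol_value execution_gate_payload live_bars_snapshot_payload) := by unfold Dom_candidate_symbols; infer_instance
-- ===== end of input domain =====

-- B flattens the three sources into one normalized stream and deduplicates by head-and-purge
-- recursion (keep the head, delete its later duplicates, recurse on the remainder), replacing
-- A's two interleaved loops that test membership in the growing output list.

-- ===== PORT A =====
-- text(raw).upper() for a string raw: (raw or "").strip().upper() = raw.strip().upper()
def pvNorm (s : String) : String := PySem.Str.upper (PySem.Str.strip s)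

def candidate_symbols (route_symbol_value : String) (execution_gate_payload : List (String × List (List (String × String)))) (live_bars_snapshot_payload : List (String × List String)) : List String :=
  let ordered : List String :=
    ([route_symbol_value] ++ (List.lookup "materialized_symbols" live_bars_snapshot_payload).getD []).foldl
      (fun ordered raw =>
        let symbol := pvNorm raw
        if symbol ≠ "" ∧ symbol ∉ ordered then ordered ++ [symbol] else ordered) []
  ((List.lookup "symbols" execution_gate_payload).getD []).foldl
    (fun ordered row =>
      let symbol := pvNorm ((List.lookup "symbol" row).getD "")
      if symbol ≠ "" ∧ symbol ∉ ordered then ordered ++ [symbol] else ordered) ordered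

-- ===== PORT B =====
-- first-occurrence dedup by recursion: keep the head, purge its duplicates, recurse
def pvPurgeDedup : List String → List String
  | [] => []
  | x :: xs => x :: pvPurgeDedup (xs.filter (fun y => y ≠ x))
termination_by xs => xs.length
decreasing_by
  simp only [List.length_unattach]
  exact Nat.lt_succ_of_le (le_trans (List.length_filter_le _ _) (le_of_eq List.length_attach))

def candidate_symbols_alt (route_symbol_value : String) (execution_gate_payload : List (String × List (List (String × String)))) (live_bars_snapshot_payload : List (String × List String)) : List String :=
  let stream : List String :=
    [route_symbol_value]
      ++ (List.lookup "materialized_symbols" live_bars_snapshot_payload).getD []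
      ++ ((List.lookup "symbols" execution_gate_payload).getD []).map
           (fun row => (List.lookup "symbol" row).getD "")
  pvPurgeDedup ((stream.map pvNorm).filter (fun s => s ≠ ""))

-- ===== PRECONDITION & SPEC =====
def Spec_candidate_symbols (route_symbol_value : String) (execution_gate_payload : List (String × List (List (String × String)))) (live_bars_snapshot_payload : List (String × List String)) (out : List String) : Prop := out = candidate_symbols_alt route_symbol_value execution_gate_payload live_bars_snapshot_payload
instance (route_symbol_value : String) (execution_gate_payload : List (String × List (List (String × String)))) (live_bars_snapshot_payload : List (String × List String)) (out : List String) : Decidable (Spec_candidate_symbols route_symbol_value execution_gate_payload live_bars_snapshot_payload out) := by unfold Spec_candidate_symbols; infer_instance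

-- ===== CLAIM (what is proved, stated in full; the proofs are below) =====
def Claim_equal_candidate_symbols : Prop := ∀ (route_symbol_value : String) (execution_gate_payload : List (String × List (List (String × String)))) (live_bars_snapshot_payload : List (String × List String)), Dom_candidate_symbols route_symbol_value execution_gate_payload live_bars_snapshot_payload → Spec_candidate_symbols route_symbol_value execution_gate_payload live_bars_snapshot_payload (candidate_symbols route_symbol_value execution_gate_payload live_bars_snapshot_payload)

-- ===== LEMMAS AND PROOFS =====

-- the effect of A's append-if-new step on an already-normalized non-empty symbol
def pvIns (a : List String) (s : String) : List String := if s ∈ a then a else a ++ [s]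

-- A's loop body over raw candidates equals the plain insert step over the
-- normalized, empties-removed stream.
lemma foldA_eq_filter (raws : List String) (acc : List String) :
    raws.foldl (fun a raw =>
        let s := pvNorm raw
        if s ≠ "" ∧ s ∉ a then a ++ [s] else a) acc
    = ((raws.map pvNorm).filter (fun s => s ≠ "")).foldl pvIns acc := by
  induction raws generalizing acc with
  | nil => simp
  | cons x xs ih =>
    simp only [List.foldl_cons, List.map_cons, List.filter_cons]
    by_cases hx : pvNorm x = ""
    · rw [ih]; simp [hx]
    · by_cases hm : pvNorm x ∈ acc
      · rw [ih]; simp [hx, hm, pvIns]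
      · rw [ih]; simp [hx, hm, pvIns]

-- A's second loop, over the gate rows, is the same fold over the extracted symbol strings.
lemma foldRows_eq_filter (rows : List (List (String × String))) (acc : List String) :
    rows.foldl (fun a row =>
        let s := pvNorm ((List.lookup "symbol" row).getD "")
        if s ≠ "" ∧ s ∉ a then a ++ [s] else a) acc
    = (((rows.map (fun row => (List.lookup "symbol" row).getD "")).map pvNorm).filter
        (fun s => s ≠ "")).foldl pvIns acc := by
  induction rows generalizing acc with
  | nil => simp
  | cons x xs ih =>
    simp only [List.foldl_cons, List.map_cons, List.filter_cons]
    by_cases hx : pvNorm ((List.lookup "symbol" x).getD "") = ""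
    · rw [ih]; simp [hx]
    · by_cases hm : pvNorm ((List.lookup "symbol" x).getD "") ∈ acc
      · rw [ih]; simp [hx, hm, pvIns]
      · rw [ih]; simp [hx, hm, pvIns]

-- the accumulator fold equals head-and-purge dedup of the part not already in the accumulator
lemma purge_nil : pvPurgeDedup [] = [] := by rw [pvPurgeDedup.eq_def]

lemma purge_cons (x : String) (xs : List String) :
    pvPurgeDedup (x :: xs) = x :: pvPurgeDedup (xs.filter (fun y => y ≠ x)) := by
  rw [pvPurgeDedup.eq_def]

lemma foldl_pvIns_eq_purge (zs : List String) (acc : List String) :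
    zs.foldl pvIns acc = acc ++ pvPurgeDedup (zs.filter (fun y => y ∉ acc)) := by
  induction zs generalizing acc with
  | nil => simp [purge_nil]
  | cons x xs ih =>
    simp only [List.foldl_cons, List.filter_cons]
    by_cases hm : x ∈ acc
    · rw [ih]; simp [pvIns, hm]
    · have hx : pvIns acc x = acc ++ [x] := by simp [pvIns, hm]
      rw [hx, ih, List.append_assoc]
      simp only [hm, not_false_iff, decide_true, if_pos]
      congr 1
      rw [purge_cons, List.filter_filter]
      simp only [List.singleton_append, List.cons.injEq, true_and]
      congr 1
      apply List.filter_congr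
      intro y _
      simp [List.mem_append, not_or, Bool.and_comm]

-- ===== VERDICT (by name: the statement is the Claim_ definition above) =====
theorem candidate_symbols_spec : Claim_equal_candidate_symbols := by
  intro r gate live _
  unfold Spec_candidate_symbols candidate_symbols candidate_symbols_alt
  rw [foldA_eq_filter, foldRows_eq_filter, ← List.foldl_append, ← List.filter_append,
    ← List.map_append, List.append_assoc, foldl_pvIns_eq_purge]
  simp [List.filter_filter]
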